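-- pv_equiv track=rewrite | github.com/Ae486/pdfTranslator | src/translation/markdown_translator.py | _protect_code_blocks
-- ===== SOURCE A (Python) =====
-- from typing import List, Tuple, Dict, Any
--
-- def _protect_code_blocks(text: str) -> Tuple[str, Dict[str, str]]:
--     """
--     保护代码块，将其替换为占位符
--     :param text: 原始文本
--     :return: (替换后的文本, 代码块字典)
--     """
--     lines = text.split('\n')
--     result_lines = []
--
--     # 存储所有提取的代码块
--     code_blocks = {}
--     current_block = []
--     in_code_block = False
--     block_id = 0
--
--     for line in lines:
--         # 检测代码块开始或结束
--         if line.strip().startswith("```"):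
--             if not in_code_block:  # 开始一个新代码块
--                 in_code_block = True
--                 current_block = [line]  # 包含开始行
--             else:  # 结束当前代码块
--                 current_block.append(line)  # 包含结束行
--                 # 生成占位符并存储代码块
--                 placeholder = f"__CODE_BLOCK_{block_id}__"
--                 code_blocks[placeholder] = '\n'.join(current_block)
--                 result_lines.append(placeholder)
--                 in_code_block = False
--                 block_id += 1
--         else:
--             if in_code_block:
--                 current_block.append(line)
--             else:
--                 result_lines.append(line)
--
--     # 处理文档末尾未关闭的代码块
--     if in_code_block:
--         placeholder = f"__CODE_BLOCK_{block_id}__"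
--         code_blocks[placeholder] = '\n'.join(current_block)
--         result_lines.append(placeholder)
--
--     return '\n'.join(result_lines), code_blocks
-- ===== SOURCE B (Python) =====
-- from typing import Tuple, Dict
--
--
-- def _protect_code_blocks(text: str) -> Tuple[str, Dict[str, str]]:
--     """
--     Protect code blocks by replacing them with placeholders.
--     Nested fence scan: on a fence line, scan ahead for the closing fence and
--     consume the whole block at once, instead of a flag state-machine.
--     """
--     lines = text.split('\n')
--     out = []
--     pairs = []
--     block_id = 0
--     i = 0
--     n = len(lines)
--     while i < n:
--         if lines[i].strip().startswith("```"):
--             j = i + 1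
--             while j < n and not lines[j].strip().startswith("```"):
--                 j += 1
--             # j == n means the block is never closed: take everything to the end
--             placeholder = f"__CODE_BLOCK_{block_id}__"
--             pairs.append((placeholder, '\n'.join(lines[i:j + 1])))
--             out.append(placeholder)
--             block_id += 1
--             i = j + 1
--         else:
--             out.append(lines[i])
--             i += 1
--     return '\n'.join(out), dict(pairs)
-- ===== Notes on version B (the rewrite author's own statement) =====
-- stated objective: alternative
-- what changed: Replaces A's in-code-block flag state machine (one foldl with five pieces of loop state) by an outer loop that, on a fence line, runs a nested forward scan consuming the whole code block at once, with the unclosed final block falling out of the scan reaching end-of-input.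
import Mathlib
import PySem

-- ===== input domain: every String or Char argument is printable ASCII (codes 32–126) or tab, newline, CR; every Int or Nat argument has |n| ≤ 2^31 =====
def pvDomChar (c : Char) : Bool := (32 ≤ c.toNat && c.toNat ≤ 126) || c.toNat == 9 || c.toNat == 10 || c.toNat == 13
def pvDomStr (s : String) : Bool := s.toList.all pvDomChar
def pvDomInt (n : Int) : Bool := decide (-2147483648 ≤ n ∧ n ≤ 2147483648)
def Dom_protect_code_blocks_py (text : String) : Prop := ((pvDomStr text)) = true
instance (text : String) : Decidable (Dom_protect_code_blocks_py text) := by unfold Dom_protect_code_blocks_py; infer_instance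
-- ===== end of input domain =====

-- B replaces A's in-code-block flag state machine by a nested scan that consumes a
-- whole fenced block at once (same O(n) cost; objective: alternative decomposition).

-- shared helpers (the identical Python expressions occur in A and in B)
-- line.strip().startswith("```")
def pvFence (line : String) : Bool := PySem.Str.startswith (PySem.Str.strip line) "```"
-- f"__CODE_BLOCK_{block_id}__"
def pvPH (block_id : Int) : String :=
  PySem.Str.join "" ["__CODE_BLOCK_", PySem.Int.toStr block_id, "__"]

-- ===== PORT A =====
-- state = (result_lines, code_blocks, current_block, in_code_block, block_id)
def pvStepA (s : List String × PySem.Dict String String × List String × Bool × Int)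
    (line : String) : List String × PySem.Dict String String × List String × Bool × Int :=
  let (result_lines, code_blocks, current_block, in_code_block, block_id) := s
  if pvFence line then
    if !in_code_block then
      (result_lines, code_blocks, [line], true, block_id)
    else
      let current_block := current_block ++ [line]
      let placeholder := pvPH block_id
      (result_lines ++ [placeholder],
       code_blocks.insert placeholder (PySem.Str.join "\n" current_block),
       current_block, false, block_id + 1)
  else
    if in_code_block then
      (result_lines, code_blocks, current_block ++ [line], in_code_block, block_id)
    else
      (result_lines ++ [line], code_blocks, current_block, in_code_block, block_id)

def protect_code_blocks_py (text : String) : String × (List (String × String)) :=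
  let lines := (PySem.Str.split? text "\n").getD []  -- sep "\n" ≠ "": split? is never none
  let s := lines.foldl pvStepA ([], PySem.Dict.empty, [], false, 0)
  let (result_lines, code_blocks, current_block, in_code_block, block_id) := s
  if in_code_block then
    let placeholder := pvPH block_id
    (PySem.Str.join "\n" (result_lines ++ [placeholder]),
     (code_blocks.insert placeholder (PySem.Str.join "\n" current_block)).items)
  else
    (PySem.Str.join "\n" result_lines, code_blocks.items)

-- ===== PORT B =====
-- inner while loop of B: scan forward to the closing fence;
-- returns (lines before it, some (fence line, lines after it)) or (all lines, none)
def pvScan (ls : List String) : List String × Option (String × List String) :=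
  match ls with
  | [] => ([], none)
  | l :: ls' =>
    if pvFence l then ([], some (l, ls'))
    else
      let (body, r) := pvScan ls'
      (l :: body, r)

lemma pvScan_rest_lt (ls : List String) {body : List String} {f : String} {rest : List String}
    (h : pvScan ls = (body, some (f, rest))) : rest.length < ls.length + 1 := by
  induction ls generalizing body with
  | nil => simp [pvScan] at h
  | cons l ls' ih =>
    by_cases hf : pvFence l
    · simp [pvScan, hf] at h
      simp [h.2.2]
    · simp only [pvScan, hf] at h
      rcases hb : pvScan ls' with ⟨body', r⟩
      rw [hb] at h
      simp at h
      have := ih (body := body') (by rw [hb, h.2])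
      simpa using Nat.lt_succ_of_lt this

-- outer while loop of B, as structural recursion on the remaining lines
def pvGo (lines : List String) (block_id : Int) : List String × List (String × String) :=
  match lines with
  | [] => ([], [])
  | l :: ls =>
    if pvFence l then
      let placeholder := pvPH block_id
      match hs : pvScan ls with
      | (body, some (f, rest)) =>
        let (out, pairs) := pvGo rest (block_id + 1)
        (placeholder :: out,
         (placeholder, PySem.Str.join "\n" (l :: (body ++ [f]))) :: pairs)
      | (body, none) =>
        ([placeholder], [(placeholder, PySem.Str.join "\n" (l :: body))])
    else
      let (out, pairs) := pvGo ls block_id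
      (l :: out, pairs)
termination_by lines.length
decreasing_by
  · exact pvScan_rest_lt ls hs
  · simp

def protect_code_blocks_py_alt (text : String) : String × (List (String × String)) :=
  let lines := (PySem.Str.split? text "\n").getD []  -- sep "\n" ≠ "": split? is never none
  let (out, pairs) := pvGo lines 0
  (PySem.Str.join "\n" out, (PySem.Dict.empty.update pairs).items)  -- dict(pairs)

-- ===== PRECONDITION & SPEC =====
def Spec_protect_code_blocks_py (text : String) (out : String × (List (String × String))) : Prop := out = protect_code_blocks_py_alt text
instance (text : String) (out : String × (List (String × String))) : Decidable (Spec_protect_code_blocks_py text out) := by unfold Spec_protect_code_blocks_py; infer_instance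

-- ===== CLAIM (what is proved, stated in full; the proofs are below) =====
def Claim_equal_protect_code_blocks_py : Prop := ∀ (text : String), Dom_protect_code_blocks_py text → Spec_protect_code_blocks_py text (protect_code_blocks_py text)

-- ===== LEMMAS AND PROOFS =====

-- unconditional equations for pvGo
lemma pvGo_nil (id : Int) : pvGo [] id = ([], []) := by rw [pvGo]

lemma pvGo_fence_some {l : String} {ls body : List String} {f : String} {rest : List String}
    (hf : pvFence l = true) (hs : pvScan ls = (body, some (f, rest))) (id : Int) :
    pvGo (l :: ls) id =
      (pvPH id :: (pvGo rest (id + 1)).1,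
       (pvPH id, PySem.Str.join "\n" (l :: (body ++ [f]))) :: (pvGo rest (id + 1)).2) := by
  rw [pvGo]
  rw [if_pos hf]
  split
  · rename_i body' f' rest' heq
    rw [hs] at heq
    cases heq
    rfl
  · rename_i body' heq
    rw [hs] at heq
    cases heq

lemma pvGo_fence_none {l : String} {ls body : List String}
    (hf : pvFence l = true) (hs : pvScan ls = (body, none)) (id : Int) :
    pvGo (l :: ls) id = ([pvPH id], [(pvPH id, PySem.Str.join "\n" (l :: body))]) := by
  rw [pvGo]
  rw [if_pos hf]
  split
  · rename_i body' f' rest' heq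
    rw [hs] at heq
    cases heq
  · rename_i body' heq
    rw [hs] at heq
    cases heq
    rfl

lemma pvGo_nofence {l : String} {ls : List String} (hf : pvFence l = false) (id : Int) :
    pvGo (l :: ls) id = (l :: (pvGo ls id).1, (pvGo ls id).2) := by
  rw [pvGo]
  simp [hf]


-- str(block_id) is injective for block_id ≥ 0, hence the placeholder keys are distinct
lemma pvDigitCharInj (a b : Nat) (ha : a < 10) (hb : b < 10)
    (h : Nat.digitChar a = Nat.digitChar b) : a = b := by
  interval_cases a <;> interval_cases b <;> simp_all [Nat.digitChar]

lemma pvMapDigitCharInj (l1 l2 : List Nat) (h1 : ∀ x ∈ l1, x < 10) (h2 : ∀ x ∈ l2, x < 10)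
    (h : l1.map Nat.digitChar = l2.map Nat.digitChar) : l1 = l2 := by
  induction l1 generalizing l2 with
  | nil => cases l2 <;> simp_all
  | cons a t ih =>
    cases l2 with
    | nil => simp_all
    | cons b t2 =>
      simp only [List.map_cons, List.cons.injEq] at h
      have hab := pvDigitCharInj a b (h1 a (by simp)) (h2 b (by simp)) h.1
      have ht := ih t2 (fun x hx => h1 x (List.mem_cons_of_mem a hx)) (fun x hx => h2 x (List.mem_cons_of_mem b hx)) h.2
      simp [hab, ht]

lemma pvToDigitsCore10 (f n : Nat) (acc : List Char) (h : n < f) :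
    Nat.toDigitsCore 10 f n acc =
      (if n = 0 then ['0'] else ((Nat.digits 10 n).map Nat.digitChar).reverse) ++ acc := by
  induction f generalizing n acc with
  | zero => omega
  | succ f ih =>
    rw [Nat.toDigitsCore]
    by_cases h0 : n / 10 = 0
    · have hn : n < 10 := by omega
      simp only [h0]
      by_cases hz : n = 0
      · subst hz; simp [Nat.digitChar]
      · rw [if_neg hz, Nat.digits_def' (by norm_num) (Nat.pos_of_ne_zero hz), h0]
        simp [Nat.mod_eq_of_lt hn]
    · have hn10 : 10 ≤ n := by omega
      have hlt : n / 10 < f := by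
        have := Nat.div_lt_self (by omega : 0 < n) (by norm_num : 1 < 10)
        omega
      simp only [h0]
      rw [ih (n / 10) _ hlt, if_neg h0, if_neg (show ¬ n = 0 by omega)]
      rw [Nat.digits_def' (by norm_num : 1 < 10) (by omega : 0 < n)]
      simp

lemma pvToDigits10Inj (m n : Nat) (h : Nat.toDigits 10 m = Nat.toDigits 10 n) : m = n := by
  unfold Nat.toDigits at h
  rw [pvToDigitsCore10 _ _ _ (Nat.lt_succ_self m), pvToDigitsCore10 _ _ _ (Nat.lt_succ_self n)] at h
  simp only [List.append_nil] at h
  by_cases hm : m = 0 <;> by_cases hn : n = 0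
  · omega
  · exfalso
    rw [if_pos hm, if_neg hn, eq_comm, List.reverse_eq_iff] at h
    simp only [List.reverse_cons, List.reverse_nil, List.nil_append] at h
    have : Nat.digits 10 n = [0] := by
      have hd : ∀ x ∈ Nat.digits 10 n, x < 10 := fun x hx => Nat.digits_lt_base (by norm_num) hx
      have := pvMapDigitCharInj (Nat.digits 10 n) [0] hd (by simp) (by simpa [Nat.digitChar] using h)
      exact this
    have h2 := Nat.ofDigits_digits 10 n
    rw [this] at h2
    simp [Nat.ofDigits] at h2
    omega
  · exfalso
    rw [if_neg hm, if_pos hn, List.reverse_eq_iff] at h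
    simp only [List.reverse_cons, List.reverse_nil, List.nil_append] at h
    have hdm : Nat.digits 10 m = [0] := by
      have hd : ∀ x ∈ Nat.digits 10 m, x < 10 := fun x hx => Nat.digits_lt_base (by norm_num) hx
      exact pvMapDigitCharInj (Nat.digits 10 m) [0] hd (by simp) (by simpa [Nat.digitChar] using h)
    have h2 := Nat.ofDigits_digits 10 m
    rw [hdm] at h2
    simp [Nat.ofDigits] at h2
    omega
  · rw [if_neg hm, if_neg hn, List.reverse_inj] at h
    have := pvMapDigitCharInj _ _ (fun x hx => Nat.digits_lt_base (by norm_num) hx)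
      (fun x hx => Nat.digits_lt_base (by norm_num) hx) h
    calc m = Nat.ofDigits 10 (Nat.digits 10 m) := (Nat.ofDigits_digits 10 m).symm
    _ = Nat.ofDigits 10 (Nat.digits 10 n) := by rw [this]
    _ = n := Nat.ofDigits_digits 10 n

lemma pvToCharsInj (a b : Int) (ha : 0 ≤ a) (hb : 0 ≤ b)
    (h : PySem.Int.toChars a = PySem.Int.toChars b) : a = b := by
  unfold PySem.Int.toChars at h
  rw [if_neg (by omega), if_neg (by omega)] at h
  have := pvToDigits10Inj _ _ h
  omega

lemma pvPHInj' (a b : Int) (ha : 0 ≤ a) (hb : 0 ≤ b)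
    (h : pvPH a = pvPH b) : a = b := by
  have h' := congrArg String.toList h
  simp only [pvPH, PySem.Str.toList_join, List.map_cons, List.map_nil,
    PySem.Chars.join, PySem.Int.toList_toStr] at h'
  simp only [List.intercalate, List.intersperse, List.flatten, List.append_eq] at h'
  have h2 := List.append_cancel_left (List.append_cancel_left h')
  have h3 := List.append_cancel_right h2
  exact pvToCharsInj a b ha hb h3


lemma pvGoKeysAux : ∀ (n : Nat) (lines : List String), lines.length ≤ n → ∀ (id : Int), 0 ≤ id →
    (∀ p ∈ (pvGo lines id).2, ∃ m : Int, id ≤ m ∧ p.1 = pvPH m) ∧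
    ((pvGo lines id).2.map Prod.fst).Nodup := by
  intro n
  induction n with
  | zero =>
    intro lines hlen id h0
    have : lines = [] := List.length_eq_zero_iff.mp (Nat.le_zero.mp hlen)
    simp [this, pvGo_nil]
  | succ n ih =>
    intro lines hlen id h0
    match lines with
    | [] => simp [pvGo_nil]
    | l :: ls =>
      by_cases hf : pvFence l
      · rcases hscan : pvScan ls with ⟨body, r⟩
        match r with
        | some (f, rest) =>
          rw [pvGo_fence_some hf hscan]
          have hrl : rest.length ≤ n := by
            have h1 := pvScan_rest_lt ls hscan
            simp at hlen
            omega
          have ihr := ih rest hrl (id + 1) (by omega)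
          constructor
          · intro p hp
            rcases List.mem_cons.mp hp with h | h
            · exact ⟨id, le_refl id, by rw [h]⟩
            · rcases ihr.1 p h with ⟨m, hm, hpm⟩
              exact ⟨m, by omega, hpm⟩
          · simp only [List.map_cons, List.nodup_cons]
            refine ⟨?_, ihr.2⟩
            intro hmem
            rcases List.mem_map.mp hmem with ⟨p, hp, hpe⟩
            rcases ihr.1 p hp with ⟨m, hm, hpm⟩
            rw [hpm] at hpe
            have := pvPHInj' m id (by omega) h0 hpe
            omega
        | none =>
          rw [pvGo_fence_none hf hscan]
          exact ⟨fun p hp => ⟨id, le_refl id, by simp at hp; rw [hp]⟩, by simp⟩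
      · rw [pvGo_nofence (Bool.not_eq_true _ ▸ Bool.of_not_eq_true hf)]
        have : ls.length ≤ n := by simp at hlen; omega
        exact ih ls this id h0

-- A's final (result text lines, code_blocks items) assembly, as a function of the loop state
def pvFin (s : List String × PySem.Dict String String × List String × Bool × Int) :
    List String × List (String × String) :=
  let (res, d, cb, inb, id) := s
  if inb then (res ++ [pvPH id], (d.insert (pvPH id) (PySem.Str.join "\n" cb)).items)
  else (res, d.items)

lemma pvMain : ∀ (lines : List String) (d : PySem.Dict String String)
    (res cb : List String) (id : Int), 0 ≤ id →
    (∀ m : Int, id ≤ m → d.contains (pvPH m) = false) →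
    (pvFin (lines.foldl pvStepA (res, d, cb, false, id)) =
      (res ++ (pvGo lines id).1, d.items ++ (pvGo lines id).2))
  ∧ (pvFin (lines.foldl pvStepA (res, d, cb, true, id)) =
      (match pvScan lines with
       | (body, none) =>
          (res ++ [pvPH id], d.items ++ [(pvPH id, PySem.Str.join "\n" (cb ++ body))])
       | (body, some (f, rest)) =>
          (res ++ pvPH id :: (pvGo rest (id + 1)).1,
           d.items ++ (pvPH id, PySem.Str.join "\n" (cb ++ body ++ [f])) :: (pvGo rest (id + 1)).2))) := by
  intro lines
  induction lines with
  | nil =>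
    intro d res cb id h0 hfresh
    constructor
    · simp [pvFin, pvGo_nil]
    · simp only [List.foldl_nil, pvScan, pvFin]
      rw [PySem.Dict.items_insert_of_not_contains _ _ (hfresh id (le_refl id))]
      simp
  | cons l ls ih =>
    intro d res cb id h0 hfresh
    constructor
    · -- not in a code block before l
      by_cases hf : pvFence l
      · -- open a block
        have step : pvStepA (res, d, cb, false, id) l = (res, d, [l], true, id) := by
          simp [pvStepA, hf]
        rw [List.foldl_cons, step]
        have := (ih d res [l] id h0 hfresh).2
        rw [this]
        rcases hscan : pvScan ls with ⟨body, r⟩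
        match r with
        | some (f, rest) =>
          rw [pvGo_fence_some hf hscan]
          simp
        | none =>
          rw [pvGo_fence_none hf hscan]
          simp
      · -- plain line
        have hf' : pvFence l = false := by simp [hf]
        have step : pvStepA (res, d, cb, false, id) l = (res ++ [l], d, cb, false, id) := by
          simp [pvStepA, hf']
        rw [List.foldl_cons, step]
        rw [(ih d (res ++ [l]) cb id h0 hfresh).1]
        rw [pvGo_nofence hf']
        simp
    · -- inside a code block before l
      by_cases hf : pvFence l
      · -- closing fence
        have step : pvStepA (res, d, cb, true, id) l =
            (res ++ [pvPH id], d.insert (pvPH id) (PySem.Str.join "\n" (cb ++ [l])),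
             cb ++ [l], false, id + 1) := by
          simp [pvStepA, hf]
        rw [List.foldl_cons, step]
        have hfresh' : ∀ m : Int, id + 1 ≤ m →
            (d.insert (pvPH id) (PySem.Str.join "\n" (cb ++ [l]))).contains (pvPH m) = false := by
          intro m hm
          rw [PySem.Dict.contains_insert]
          have hne : pvPH m ≠ pvPH id := by
            intro he
            have := pvPHInj' m id (by omega) h0 he
            omega
          simp [hne, hfresh m (by omega)]
        rw [(ih _ _ (cb ++ [l]) (id + 1) (by omega) hfresh').1]
        rw [PySem.Dict.items_insert_of_not_contains _ _ (hfresh id (le_refl id))]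
        have hscan : pvScan (l :: ls) = ([], some (l, ls)) := by simp [pvScan, hf]
        rw [hscan]
        simp
      · -- body line of the block
        have hf' : pvFence l = false := by simp [hf]
        have step : pvStepA (res, d, cb, true, id) l = (res, d, cb ++ [l], true, id) := by
          simp [pvStepA, hf']
        rw [List.foldl_cons, step]
        rw [(ih d res (cb ++ [l]) id h0 hfresh).2]
        have hscan : pvScan (l :: ls) =
            ((pvScan ls).1.cons l, (pvScan ls).2) := by
          simp [pvScan, hf']
        rw [hscan]
        rcases hs2 : pvScan ls with ⟨body, r⟩
        match r with
        | some (f, rest) => simp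
        | none => simp

lemma pvFinalEq (text : String) : protect_code_blocks_py text = protect_code_blocks_py_alt text := by
  unfold protect_code_blocks_py protect_code_blocks_py_alt
  set lines := (PySem.Str.split? text "\n").getD []
  have hmain := (pvMain lines PySem.Dict.empty [] [] 0 (by omega)
    (fun m _ => PySem.Dict.contains_empty _)).1
  rcases hst : List.foldl pvStepA ([], PySem.Dict.empty, [], false, 0) lines with ⟨res, d, cb, inb, id⟩
  rcases hgo : pvGo lines 0 with ⟨out, pairs⟩
  rw [hst, hgo] at hmain
  have hkeys := pvGoKeysAux lines.length lines (le_refl _) 0 (by omega)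
  rw [hgo] at hkeys
  have hupd : (PySem.Dict.empty.update pairs).items = pairs := by
    have h2 := PySem.Dict.items_foldl_insert_fresh pairs Prod.fst Prod.snd PySem.Dict.empty
      (fun a _ => PySem.Dict.contains_empty _) hkeys.2
    simpa [PySem.Dict.update] using h2
  simp only [hst, hgo, hupd]
  have hempty : (PySem.Dict.empty : PySem.Dict String String).items = [] := rfl
  rw [hempty] at hmain
  by_cases hb : inb
  · subst hb
    simp only [pvFin, if_true, List.nil_append, Prod.mk.injEq] at hmain
    simp only [if_true]
    rw [hmain.1, hmain.2]
  · have hb' : inb = false := by simpa using hb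
    subst hb'
    simp only [pvFin, Bool.false_eq_true, if_false, List.nil_append, Prod.mk.injEq] at hmain
    simp only [Bool.false_eq_true, if_false]
    rw [hmain.1, hmain.2]

-- ===== VERDICT (by name: the statement is the Claim_ definition above) =====
theorem protect_code_blocks_py_spec : Claim_equal_protect_code_blocks_py := by
  intro text _
  unfold Spec_protect_code_blocks_py
  exact pvFinalEq text
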